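-- pv_equiv track=rewrite | github.com/atit1211/Hashcoin | hashcoin.py | seq_hash_gen
-- ===== SOURCE A (Python) =====
-- def seq_hash_gen(seq):
--     unused=['0x2406e','0x1a599','0x1b7df','0x25dab','0x2786c','0x21ace','0x1d3ba','0x1ad26','0x20bfb','0x1eedf']
--     c_key=[ 0x1afd8,0x27852,0x1ffc7,0x1d2f3,0x20a4c,0x20c72,0x18ab7,0x21fd7,0x1c463,0x1a65f,0x1b603,0x18e0f,0x21f9b,
--             0x24e8f,0x1ef5f,0x20ba5,0x219e0,0x260ac,0x2358a,0x19cc0,0x1b569,0x21d35,0x1d7be,0x2119b,0x1ba59,0x24899,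
--             0x27372,0x216a0,0x1d9df,0x1c3f1,0x235fc,0x2732b,0x274e5,0x1a018,0x18bc0,0x1d5f1,0x18e6e,0x1c1f6,0x1b250,
--             0x23263,0x1ea80,0x23a19,0x1c29a,0x21a96,0x25883,0x219d2,0x1bcd5,0x1cd79,0x19da8,0x2419b,0x23ad9,0x22eec ]
--     l_key=[ 0x1abe8,0x24910,0x25256,0x1a5c6,0x25d9e,0x20e9b,0x1e3c3,0x2038b,0x257e1,0x2074d,0x22cf6,0x1db25,0x1c11d,
--             0x1e013,0x1a12b,0x1fec6,0x2504b,0x20b98,0x1f08f,0x23bcc,0x1a1e1,0x187df,0x20084,0x1acbe,0x1c740,0x1c5bc,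
--             0x1bbea,0x24a41,0x2147f,0x1908c,0x26922,0x21920,0x267bc,0x1d417,0x24642,0x1b182,0x1ff97,0x27435,0x1a645,
--             0x247a5,0x1b175,0x21e6a,0x1d2a2,0x247a3,0x18dd2,0x2239d,0x1ebe3,0x2699c,0x1cc6b,0x1e108,0x26dd7,0x21f03 ]
--     n_key=[ 0x21886,0x18cd5,0x275eb,0x2424e,0x1bdb0,0x19c7c,0x229f2,0x21b50,0x2100d,0x1a9fe ]
--     s_key=[ 0x1955e,0x1c0c9 ]
--     freq={}
--     lst_key=[]
--     seq=str(seq)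
--     for i in seq:
--         if i.isalpha():
--             if i in freq:
--                 freq[i]=freq[i]+1
--             else:
--                 freq[i]=1
--             if (ord(i)>=97 and ord(i)<=122):
--                 if freq[i]%2==1:
--                     lst_key.append(l_key[ord(i)-97])
--                 else:
--                     lst_key.append(l_key[ord(i)-97+26])
--             elif (ord(i)>=65 and ord(i)<=90):
--                 if freq[i]%2==1:
--                     lst_key.append(c_key[ord(i)-65])
--                 else:
--                     lst_key.append(c_key[ord(i)-65+26])
--         elif i.isnumeric():
--             lst_key.append(n_key[int(i)])
--         elif i == ' ':
--             lst_key.append(s_key[0])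
--         else:
--             lst_key.append(s_key[1])
--     dct={0:[0x26e43],1:[0x2565a],2:[0x267d1],3:[0x1f029],4:[0x26c15]}
--     for i in range(len(lst_key)):
--         j=i%5
--         dct[j].append(lst_key[i])
--     hex_list=[]
--     for i in dct:
--         sum_of=0
--         for j in dct[i]:
--             sum_of=sum_of+j
--         hex_list.append(sum_of)
--     string=""
--     for itr in range(len(hex_list)):
--         temp=hex(hex_list[itr])
--         temp=temp[-5:]
--         string=string+temp
--     return string
-- ===== SOURCE B (Python) =====
-- def seq_hash_gen(seq):
--     c_key=[ 0x1afd8,0x27852,0x1ffc7,0x1d2f3,0x20a4c,0x20c72,0x18ab7,0x21fd7,0x1c463,0x1a65f,0x1b603,0x18e0f,0x21f9b,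
--             0x24e8f,0x1ef5f,0x20ba5,0x219e0,0x260ac,0x2358a,0x19cc0,0x1b569,0x21d35,0x1d7be,0x2119b,0x1ba59,0x24899,
--             0x27372,0x216a0,0x1d9df,0x1c3f1,0x235fc,0x2732b,0x274e5,0x1a018,0x18bc0,0x1d5f1,0x18e6e,0x1c1f6,0x1b250,
--             0x23263,0x1ea80,0x23a19,0x1c29a,0x21a96,0x25883,0x219d2,0x1bcd5,0x1cd79,0x19da8,0x2419b,0x23ad9,0x22eec ]
--     l_key=[ 0x1abe8,0x24910,0x25256,0x1a5c6,0x25d9e,0x20e9b,0x1e3c3,0x2038b,0x257e1,0x2074d,0x22cf6,0x1db25,0x1c11d,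
--             0x1e013,0x1a12b,0x1fec6,0x2504b,0x20b98,0x1f08f,0x23bcc,0x1a1e1,0x187df,0x20084,0x1acbe,0x1c740,0x1c5bc,
--             0x1bbea,0x24a41,0x2147f,0x1908c,0x26922,0x21920,0x267bc,0x1d417,0x24642,0x1b182,0x1ff97,0x27435,0x1a645,
--             0x247a5,0x1b175,0x21e6a,0x1d2a2,0x247a3,0x18dd2,0x2239d,0x1ebe3,0x2699c,0x1cc6b,0x1e108,0x26dd7,0x21f03 ]
--     n_key=[ 0x21886,0x18cd5,0x275eb,0x2424e,0x1bdb0,0x19c7c,0x229f2,0x21b50,0x2100d,0x1a9fe ]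
--     s_key=[ 0x1955e,0x1c0c9 ]
--     buckets=[0x26e43,0x2565a,0x267d1,0x1f029,0x26c15]
--     freq={}
--     pos=0
--     for ch in str(seq):
--         if ch.isalpha():
--             freq[ch]=freq.get(ch,0)+1
--             o=ord(ch)
--             if 97<=o<=122:
--                 k=l_key[o-97 if freq[ch]%2==1 else o-71]
--             elif 65<=o<=90:
--                 k=c_key[o-65 if freq[ch]%2==1 else o-39]
--             else:
--                 continue
--         elif ch.isnumeric():
--             k=n_key[int(ch)]
--         elif ch==' ':
--             k=s_key[0]
--         else:
--             k=s_key[1]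
--         buckets[pos%5]+=k
--         pos+=1
--     out=""
--     for b in buckets:
--         out+=hex(b)[-5:]
--     return out
-- ===== Notes on version B (the rewrite author's own statement) =====
-- stated objective: simpler
-- what changed: B fuses A's three sequential phases (build lst_key, distribute it round-robin into a dict of five bucket lists, then sum each list) into one pass that adds each character's key directly into five running bucket sums, dropping the intermediate key list and the dict of buckets entirely.
import Mathlib
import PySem

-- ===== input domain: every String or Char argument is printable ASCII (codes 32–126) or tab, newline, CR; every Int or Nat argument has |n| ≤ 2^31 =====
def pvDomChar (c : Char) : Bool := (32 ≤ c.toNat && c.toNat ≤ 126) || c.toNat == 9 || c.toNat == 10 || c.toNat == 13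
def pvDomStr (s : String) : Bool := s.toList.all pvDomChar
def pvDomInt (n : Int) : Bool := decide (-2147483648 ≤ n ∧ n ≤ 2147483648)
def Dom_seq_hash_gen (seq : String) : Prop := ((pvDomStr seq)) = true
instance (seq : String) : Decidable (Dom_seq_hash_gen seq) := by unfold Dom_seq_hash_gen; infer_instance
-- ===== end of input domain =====

-- B folds the key selection, the round-robin bucketing and the summation into one pass over the
-- string (no intermediate lst_key, no dict of buckets); same return value, simpler decomposition.

-- ===== PORT A =====
-- the key tables (identical literals in both Pythons)
def pv_c_key : List Int := [ 0x1afd8,0x27852,0x1ffc7,0x1d2f3,0x20a4c,0x20c72,0x18ab7,0x21fd7,0x1c463,0x1a65f,0x1b603,0x18e0f,0x21f9b,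
  0x24e8f,0x1ef5f,0x20ba5,0x219e0,0x260ac,0x2358a,0x19cc0,0x1b569,0x21d35,0x1d7be,0x2119b,0x1ba59,0x24899,
  0x27372,0x216a0,0x1d9df,0x1c3f1,0x235fc,0x2732b,0x274e5,0x1a018,0x18bc0,0x1d5f1,0x18e6e,0x1c1f6,0x1b250,
  0x23263,0x1ea80,0x23a19,0x1c29a,0x21a96,0x25883,0x219d2,0x1bcd5,0x1cd79,0x19da8,0x2419b,0x23ad9,0x22eec ]
def pv_l_key : List Int := [ 0x1abe8,0x24910,0x25256,0x1a5c6,0x25d9e,0x20e9b,0x1e3c3,0x2038b,0x257e1,0x2074d,0x22cf6,0x1db25,0x1c11d,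
  0x1e013,0x1a12b,0x1fec6,0x2504b,0x20b98,0x1f08f,0x23bcc,0x1a1e1,0x187df,0x20084,0x1acbe,0x1c740,0x1c5bc,
  0x1bbea,0x24a41,0x2147f,0x1908c,0x26922,0x21920,0x267bc,0x1d417,0x24642,0x1b182,0x1ff97,0x27435,0x1a645,
  0x247a5,0x1b175,0x21e6a,0x1d2a2,0x247a3,0x18dd2,0x2239d,0x1ebe3,0x2699c,0x1cc6b,0x1e108,0x26dd7,0x21f03 ]
def pv_n_key : List Int := [ 0x21886,0x18cd5,0x275eb,0x2424e,0x1bdb0,0x19c7c,0x229f2,0x21b50,0x2100d,0x1a9fe ]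
def pv_s_key : List Int := [ 0x1955e,0x1c0c9 ]

-- hex(n): exact port of Python's built-in hex() for nonnegative n (every value formatted here is a positive sum)
def pyHex (n : Int) : String := String.ofList ('0' :: 'x' :: Nat.toDigits 16 n.toNat)

-- body of A's first loop ('for i in seq'); state = (freq, lst_key).  i.isnumeric() is isdigit on this ASCII domain.
def aChar (st : PySem.Dict Char Int × List Int) (i : Char) : PySem.Dict Char Int × List Int :=
  let freq := st.1
  let lst := st.2
  if PySem.Chars.isalpha i then
    let freq := if freq.contains i then freq.insert i (freq.getD i 0 + 1) else freq.insert i 1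
    if 97 ≤ (i.toNat : Int) ∧ (i.toNat : Int) ≤ 122 then
      if PySem.Int.mod (freq.getD i 0) 2 = 1 then
        (freq, lst ++ [PySem.List.pyGetD pv_l_key ((i.toNat : Int) - 97) 0])
      else
        (freq, lst ++ [PySem.List.pyGetD pv_l_key ((i.toNat : Int) - 97 + 26) 0])
    else if 65 ≤ (i.toNat : Int) ∧ (i.toNat : Int) ≤ 90 then
      if PySem.Int.mod (freq.getD i 0) 2 = 1 then
        (freq, lst ++ [PySem.List.pyGetD pv_c_key ((i.toNat : Int) - 65) 0])
      else
        (freq, lst ++ [PySem.List.pyGetD pv_c_key ((i.toNat : Int) - 65 + 26) 0])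
    else (freq, lst)
  else if PySem.Chars.isdigit i then
    (freq, lst ++ [PySem.List.pyGetD pv_n_key ((PySem.Int.ofChars? [i]).getD 0) 0])
  else if i = ' ' then
    (freq, lst ++ [PySem.List.pyGetD pv_s_key 0 0])
  else
    (freq, lst ++ [PySem.List.pyGetD pv_s_key 1 0])

def seq_hash_gen (seq : String) : String :=
  let r := seq.toList.foldl aChar (PySem.Dict.empty, ([] : List Int))
  let lst_key := r.2
  let dct : PySem.Dict Int (List Int) :=
    PySem.Dict.ofList [((0:Int),[(0x26e43:Int)]),(1,[0x2565a]),(2,[0x267d1]),(3,[0x1f029]),(4,[0x26c15])]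
  let dct := (PySem.List.pyRange 0 (PySem.List.len lst_key)).foldl
    (fun dd i => dd.modify (PySem.Int.mod i 5) [] (fun l => l ++ [PySem.List.pyGetD lst_key i 0])) dct
  -- 'for i in dct:' iterates the keys in insertion order; the body sums dct[i]
  let hex_list := dct.items.foldl (fun hl p => hl ++ [p.2.foldl (fun s j => s + j) 0]) []
  (PySem.List.pyRange 0 (PySem.List.len hex_list)).foldl
    (fun s itr => s ++ PySem.Str.slice (pyHex (PySem.List.pyGetD hex_list itr 0)) (some (-5)) none) ""

-- ===== PORT B =====
-- one character's key value (none = the loop's 'continue'), together with the updated freq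
def bKey (freq : PySem.Dict Char Int) (ch : Char) : PySem.Dict Char Int × Option Int :=
  if PySem.Chars.isalpha ch then
    let freq := freq.insert ch (freq.getD ch 0 + 1)
    if 97 ≤ (ch.toNat : Int) ∧ (ch.toNat : Int) ≤ 122 then
      (freq, some (PySem.List.pyGetD pv_l_key
        (if PySem.Int.mod (freq.getD ch 0) 2 = 1 then (ch.toNat : Int) - 97 else (ch.toNat : Int) - 71) 0))
    else if 65 ≤ (ch.toNat : Int) ∧ (ch.toNat : Int) ≤ 90 then
      (freq, some (PySem.List.pyGetD pv_c_key
        (if PySem.Int.mod (freq.getD ch 0) 2 = 1 then (ch.toNat : Int) - 65 else (ch.toNat : Int) - 39) 0))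
    else (freq, none)
  else if PySem.Chars.isdigit ch then
    (freq, some (PySem.List.pyGetD pv_n_key ((PySem.Int.ofChars? [ch]).getD 0) 0))
  else if ch = ' ' then (freq, some (PySem.List.pyGetD pv_s_key 0 0))
  else (freq, some (PySem.List.pyGetD pv_s_key 1 0))

-- body of B's single pass; state = (freq, buckets, pos); 'buckets[pos%5] += k; pos += 1'
def bChar (st : PySem.Dict Char Int × List Int × Int) (ch : Char) : PySem.Dict Char Int × List Int × Int :=
  match bKey st.1 ch with
  | (freq, none) => (freq, st.2.1, st.2.2)
  | (freq, some k) =>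
    (freq,
     PySem.List.pySetD st.2.1 (PySem.Int.mod st.2.2 5) (PySem.List.pyGetD st.2.1 (PySem.Int.mod st.2.2 5) 0 + k),
     st.2.2 + 1)

def seq_hash_gen_alt (seq : String) : String :=
  let st := seq.toList.foldl bChar (PySem.Dict.empty, ([0x26e43,0x2565a,0x267d1,0x1f029,0x26c15], (0:Int)))
  st.2.1.foldl (fun out b => out ++ PySem.Str.slice (pyHex b) (some (-5)) none) ""

-- ===== PRECONDITION & SPEC =====
def Spec_seq_hash_gen (seq : String) (out : String) : Prop := out = seq_hash_gen_alt seq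
instance (seq : String) (out : String) : Decidable (Spec_seq_hash_gen seq out) := by unfold Spec_seq_hash_gen; infer_instance

-- ===== CLAIM (what is proved, stated in full; the proofs are below) =====
def Claim_equal_seq_hash_gen : Prop := ∀ (seq : String), Dom_seq_hash_gen seq → Spec_seq_hash_gen seq (seq_hash_gen seq)

-- ===== LEMMAS AND PROOFS =====

-- the sequence of key values the string produces (freq threaded through)
def keysOf : List Char → PySem.Dict Char Int → List Int
  | [], _ => []
  | c :: cs, f => (bKey f c).2.toList ++ keysOf cs (bKey f c).1

def freqOf : List Char → PySem.Dict Char Int → PySem.Dict Char Int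
  | [], f => f
  | c :: cs, f => freqOf cs (bKey f c).1

-- A's bucket-distribution loop, as structural recursion on the key list with a position counter
def aDist : List Int → Nat → PySem.Dict Int (List Int) → PySem.Dict Int (List Int)
  | [], _, d => d
  | k :: ks, n, d => aDist ks (n+1) (d.modify ((n % 5 : Nat) : Int) [] (· ++ [k]))

-- B's bucket updates, abstracted over the key list
def bDist : List Int → List Int → Int → List Int
  | [], b, _ => b
  | k :: ks, b, p =>
    bDist ks (PySem.List.pySetD b (PySem.Int.mod p 5) (PySem.List.pyGetD b (PySem.Int.mod p 5) 0 + k)) (p + 1)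

lemma freq_update_eq (f : PySem.Dict Char Int) (c : Char) :
    (if f.contains c then f.insert c (f.getD c 0 + 1) else f.insert c 1) = f.insert c (f.getD c 0 + 1) := by
  by_cases h : f.contains c
  · simp [h]
  · have h0 : f.getD c 0 = 0 := by
      simp [PySem.Dict.getD, (PySem.Dict.get?_eq_none_iff_contains f c).2 (by simp [h])]
    simp [h, h0]

lemma step_eq (f : PySem.Dict Char Int) (lst : List Int) (c : Char) :
    aChar (f, lst) c = ((bKey f c).1, lst ++ (bKey f c).2.toList) := by
  unfold aChar bKey
  simp only [freq_update_eq]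
  split_ifs with h1 h2 h3 h4 h5 h6 h7 <;>
    simp_all <;> ring_nf

lemma A1 (cs : List Char) (f : PySem.Dict Char Int) (lst : List Int) :
    cs.foldl aChar (f, lst) = (freqOf cs f, lst ++ keysOf cs f) := by
  induction cs generalizing f lst with
  | nil => simp [freqOf, keysOf]
  | cons c cs ih =>
    simp only [List.foldl_cons, step_eq, ih, freqOf, keysOf, List.append_assoc]

lemma B1 (cs : List Char) (f : PySem.Dict Char Int) (b : List Int) (p : Int) :
    cs.foldl bChar (f, b, p) = (freqOf cs f, bDist (keysOf cs f) b p, p + (keysOf cs f).length) := by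
  induction cs generalizing f b p with
  | nil => simp [freqOf, keysOf, bDist]
  | cons c cs ih =>
    simp only [List.foldl_cons, bChar]
    rcases h : bKey f c with ⟨f', k?⟩
    rcases k? with _ | k <;>
    · simp [keysOf, freqOf, h, ih, bDist]
      try push_cast
      try ring

lemma R1 (ks pre : List Int) (d : PySem.Dict Int (List Int)) :
    (PySem.List.pyRange (pre.length : Int) (PySem.List.len (pre ++ ks))).foldl
      (fun dd i => dd.modify (PySem.Int.mod i 5) [] (fun l => l ++ [PySem.List.pyGetD (pre ++ ks) i 0])) d
    = aDist ks pre.length d := by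
  induction ks generalizing pre d with
  | nil => simp [pysem, aDist]
  | cons k ks ih =>
    have hlt : (pre.length : Int) < PySem.List.len (pre ++ k :: ks) := by
      simp [pysem]
    rw [PySem.List.pyRange_one_cons hlt]
    simp only [List.foldl_cons]
    have hget : PySem.List.pyGetD (pre ++ k :: ks) (pre.length : Int) 0 = k := by
      simp [List.getD]
    have hmod : PySem.Int.mod (pre.length : Int) 5 = ((pre.length % 5 : Nat) : Int) := by simp
    rw [hget, hmod]
    have := ih (pre ++ [k]) (d.modify ((pre.length % 5 : Nat) : Int) [] (· ++ [k]))
    simp only [List.append_assoc, List.singleton_append, List.length_append, List.length_singleton] at this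
    rw [aDist]
    rw [← this]
    push_cast
    ring_nf

lemma L2 (ks : List Int) (n : Nat) (l0 l1 l2 l3 l4 : List Int) :
    (aDist ks n (PySem.Dict.mk [((0:Int),l0),(1,l1),(2,l2),(3,l3),(4,l4)])).items.foldl
      (fun hl p => hl ++ [p.2.foldl (fun s j => s + j) 0]) []
    = bDist ks [l0.foldl (fun s j => s + j) 0, l1.foldl (fun s j => s + j) 0,
                l2.foldl (fun s j => s + j) 0, l3.foldl (fun s j => s + j) 0,
                l4.foldl (fun s j => s + j) 0] (n : Int) := by
  induction ks generalizing n l0 l1 l2 l3 l4 with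
  | nil => simp [aDist, bDist]
  | cons k ks ih =>
    have h5 : n % 5 = 0 ∨ n % 5 = 1 ∨ n % 5 = 2 ∨ n % 5 = 3 ∨ n % 5 = 4 := by omega
    have hmod : PySem.Int.mod (n : Int) 5 = ((n % 5 : Nat) : Int) := by simp
    have hcast : ((n + 1 : Nat) : Int) = (n : Int) + 1 := by push_cast; ring
    rcases h5 with h | h | h | h | h <;>
    · rw [aDist, bDist, hmod, h]
      simp only [Nat.cast_ofNat, Nat.cast_zero, Nat.cast_one]
      simp [PySem.Dict.modify, PySem.Dict.get?, PySem.Dict.insert, PySem.Dict.getD,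
            PySem.List.pySetD, PySem.List.pySet?, PySem.List.pyIdx?,
            PySem.List.pyGetD, PySem.List.pyGet?, hcast, ih]

lemma dct0_eq :
    PySem.Dict.ofList [((0:Int),[(0x26e43:Int)]),(1,[0x2565a]),(2,[0x267d1]),(3,[0x1f029]),(4,[0x26c15])]
    = PySem.Dict.mk [((0:Int),[(0x26e43:Int)]),(1,[0x2565a]),(2,[0x267d1]),(3,[0x1f029]),(4,[0x26c15])] := by
  decide

-- ===== VERDICT (by name: the statement is the Claim_ definition above) =====
theorem seq_hash_gen_spec : Claim_equal_seq_hash_gen := by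
  intro seq _
  unfold Spec_seq_hash_gen seq_hash_gen seq_hash_gen_alt
  simp only [A1, B1, dct0_eq, List.nil_append]
  have hR := R1 (keysOf seq.toList PySem.Dict.empty) []
    (PySem.Dict.mk [((0:Int),[(0x26e43:Int)]),(1,[0x2565a]),(2,[0x267d1]),(3,[0x1f029]),(4,[0x26c15])])
  simp only [List.nil_append, List.length_nil, Nat.cast_zero] at hR
  rw [hR]
  have hL := L2 (keysOf seq.toList PySem.Dict.empty) 0 [0x26e43] [0x2565a] [0x267d1] [0x1f029] [0x26c15]
  simp only [List.foldl_cons, List.foldl_nil, Nat.cast_zero, zero_add] at hL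
  rw [hL]
  rw [PySem.List.foldl_pyRange_zero_pyGetD
    (bDist (keysOf seq.toList PySem.Dict.empty) [0x26e43, 0x2565a, 0x267d1, 0x1f029, 0x26c15] 0) 0
    (fun out b => out ++ PySem.Str.slice (pyHex b) (some (-5)) none) ""]
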